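-- pv_equiv track=rewrite | github.com/HJY0315/SDDASG | SDDASG/SDDASG.py | calculate_road_points
-- ===== SOURCE A (Python) =====
-- def calculate_road_points(field, row):
--     connected_roads = 0
--     current_road_length = 0
--     for building in field[row]:
--         if building and building['shortform'] == '*':
--             current_road_length += 1
--         else:
--             connected_roads += current_road_length // 2
--             current_road_length = 0
--     connected_roads += current_road_length // 2
--     return connected_roads
-- ===== SOURCE B (Python) =====
-- def calculate_road_points(field, row):
--     roads = [bool(b) and b['shortform'] == '*' for b in field[row]]
--     total = 0
--     i = 0
--     while i + 1 < len(roads):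
--         if roads[i] and roads[i + 1]:
--             total += 1
--             i += 2
--         else:
--             i += 1
--     return total
-- ===== Notes on version B (the rewrite author's own statement) =====
-- stated objective: alternative
-- what changed: B precomputes a Boolean road mask and counts greedily matched disjoint adjacent road pairs (a domino-style two-step scan with no division and no run-length counter), instead of A's running counter flushed with //2 on each non-road cell.
import Mathlib
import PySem

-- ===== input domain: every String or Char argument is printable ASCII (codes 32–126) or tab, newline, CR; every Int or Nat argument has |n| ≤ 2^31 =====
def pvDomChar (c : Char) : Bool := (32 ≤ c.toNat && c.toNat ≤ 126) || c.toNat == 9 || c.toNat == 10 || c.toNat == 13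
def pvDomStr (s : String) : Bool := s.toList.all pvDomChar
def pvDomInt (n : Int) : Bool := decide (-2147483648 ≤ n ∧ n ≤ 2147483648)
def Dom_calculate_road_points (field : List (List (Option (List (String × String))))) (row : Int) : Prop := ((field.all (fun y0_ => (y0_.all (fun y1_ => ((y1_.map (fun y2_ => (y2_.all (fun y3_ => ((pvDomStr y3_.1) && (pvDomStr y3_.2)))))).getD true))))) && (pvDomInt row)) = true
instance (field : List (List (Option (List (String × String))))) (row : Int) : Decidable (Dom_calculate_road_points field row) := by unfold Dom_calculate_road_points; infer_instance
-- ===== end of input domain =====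

-- One honest line: B counts greedily matched disjoint adjacent road pairs over a precomputed
-- Boolean mask (no division, no run-length counter), instead of A's counter flushed per cell;
-- same cost, alternative algorithm.

-- `building and building['shortform'] == '*'` : truthy dict (association list, first-match lookup)
-- whose 'shortform' value is '*'; outside Pre_ the missing-key lookup defaults (Python raises there).
def pvIsRoad (b : Option (List (String × String))) : Bool :=
  match b with
  | none => false
  | some d => !d.isEmpty && ((d.lookup "shortform").getD "" == "*")

-- ===== PORT A =====
def calculate_road_points (field : List (List (Option (List (String × String))))) (row : Int) : Int :=
  let r := (PySem.List.pyGet? field row).getD []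
  let s := r.foldl
    (fun (s : Int × Int) b =>
      if pvIsRoad b then (s.1, s.2 + 1)
      else (s.1 + PySem.Int.floordiv s.2 2, 0)) (0, 0)
  s.1 + PySem.Int.floordiv s.2 2

-- ===== PORT B =====
-- the while loop over indices i, i+1 of the mask, as structural recursion on the mask's tail
def pvPair : List Bool → Int
  | [] => 0
  | [_] => 0
  | a :: b :: t => if a && b then 1 + pvPair t else pvPair (b :: t)

def calculate_road_points_alt (field : List (List (Option (List (String × String))))) (row : Int) : Int :=
  pvPair (((PySem.List.pyGet? field row).getD []).map pvIsRoad)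

-- ===== PRECONDITION & SPEC =====
-- Pre_ excludes exactly the inputs where Python A raises: row out of range (IndexError) and rows
-- containing a truthy (non-empty) dict without the key 'shortform' (KeyError). B raises there too.
def Pre_calculate_road_points (field : List (List (Option (List (String × String))))) (row : Int) : Prop :=
  PySem.Raise.InRange field.length row ∧
  ∀ b ∈ (PySem.List.pyGet? field row).getD [],
    ∀ d, b = some d → d ≠ [] → (d.lookup "shortform").isSome
instance (field : List (List (Option (List (String × String))))) (row : Int) : Decidable (Pre_calculate_road_points field row) := by unfold Pre_calculate_road_points; infer_instance

def pvWitness_calculate_road_points : (List (List (Option (List (String × String))))) × Int :=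
  ([[some [("shortform", "*")], some [("shortform", "*")], none, some [("shortform", "#")]]], 0)

def Spec_calculate_road_points (field : List (List (Option (List (String × String))))) (row : Int) (out : Int) : Prop := out = calculate_road_points_alt field row
instance (field : List (List (Option (List (String × String))))) (row : Int) (out : Int) : Decidable (Spec_calculate_road_points field row out) := by unfold Spec_calculate_road_points; infer_instance

-- ===== CLAIM (what is proved, stated in full; the proofs are below) =====
def Claim_equal_calculate_road_points : Prop := ∀ (field : List (List (Option (List (String × String))))) (row : Int), Dom_calculate_road_points field row → Pre_calculate_road_points field row → Spec_calculate_road_points field row (calculate_road_points field row)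

-- ===== LEMMAS AND PROOFS =====

-- A's loop on the Boolean mask: recursion on the remaining mask with the current run length as state
def pvG : Int → List Bool → Int
  | cur, [] => PySem.Int.floordiv cur 2
  | cur, b :: t =>
    if b then pvG (cur + 1) t
    else PySem.Int.floordiv cur 2 + pvG 0 t

theorem pvFoldl_eq_g (l : List (Option (List (String × String)))) :
    ∀ (c cur : Int),
      (l.foldl (fun (s : Int × Int) b =>
        if pvIsRoad b then (s.1, s.2 + 1)
        else (s.1 + PySem.Int.floordiv s.2 2, 0)) (c, cur)).1
      + PySem.Int.floordiv (l.foldl (fun (s : Int × Int) b =>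
        if pvIsRoad b then (s.1, s.2 + 1)
        else (s.1 + PySem.Int.floordiv s.2 2, 0)) (c, cur)).2 2
      = c + pvG cur (l.map pvIsRoad) := by
  induction l with
  | nil => intro c cur; simp [pvG]
  | cons b t ih =>
    intro c cur
    by_cases h : pvIsRoad b = true
    · simp only [List.foldl_cons, h, if_pos, List.map_cons, pvG]
      exact ih c (cur + 1)
    · simp only [List.foldl_cons, h, Bool.false_eq_true, if_false, List.map_cons, pvG]
      rw [ih (c + PySem.Int.floordiv cur 2) 0]
      ring

theorem pvG_add_two (t : List Bool) :
    ∀ (cur : Int), pvG (cur + 2) t = 1 + pvG cur t := by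
  induction t with
  | nil =>
    intro cur
    simp only [pvG]
    rw [PySem.Int.floordiv_eq_ediv_of_pos (by omega),
        PySem.Int.floordiv_eq_ediv_of_pos (by omega)]
    omega
  | cons b t ih =>
    intro cur
    by_cases h : b = true
    · simp only [pvG, h, if_pos]
      have : cur + 2 + 1 = cur + 1 + 2 := by ring
      rw [this, ih]
    · simp only [pvG, h, Bool.false_eq_true, if_false]
      rw [PySem.Int.floordiv_eq_ediv_of_pos (by omega),
          PySem.Int.floordiv_eq_ediv_of_pos (by omega)]
      omega

theorem pvPair_eq_g (bs : List Bool) : pvPair bs = pvG 0 bs := by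
  induction bs using pvPair.induct with
  | case1 => simp [pvPair, pvG, PySem.Int.floordiv]
  | case2 x =>
    cases x <;> simp [pvPair, pvG, PySem.Int.floordiv]
  | case3 a b t hab ih =>
    rw [Bool.and_eq_true] at hab
    simp only [pvPair, hab.1, hab.2, Bool.and_self, if_pos, pvG]
    have h2 : (0 : Int) + 1 + 1 = 0 + 2 := by ring
    rw [h2, pvG_add_two, ih]
  | case4 a b t hab ih =>
    simp only [pvPair, hab, Bool.false_eq_true, if_false]
    rw [ih]
    by_cases ha : a = true
    · have hb : b = false := by
        cases b; rfl; exact absurd (by simp [ha]) hab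
      simp [pvG, ha, hb, PySem.Int.floordiv]
    · simp only [Bool.not_eq_true] at ha
      simp [pvG, ha, PySem.Int.floordiv]

-- ===== VERDICT (by name: the statement is the Claim_ definition above) =====
theorem calculate_road_points_spec : Claim_equal_calculate_road_points := by
  intro field row _ _
  unfold Spec_calculate_road_points calculate_road_points calculate_road_points_alt
  rw [pvFoldl_eq_g, pvPair_eq_g, zero_add]
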